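-- pv_equiv track=rewrite | github.com/eriosgamer/NPM-Stream-Maker | Client/port_file_reader.py | expand_instances_per_port
-- ===== SOURCE A (Python) =====
-- def expand_instances_per_port(ports, max_instances=5):
--     """
--     For individual ports, expands up to max_instances consecutive ports for each base.
--     Avoids overlaps.
--     """
--     expanded_ports = set()
--     used = set()
--     for p in sorted(ports):
--         block = set(p + i for i in range(max_instances))
--         if not block & used:
--             expanded_ports.update(block)
--             used.update(block)
--     return expanded_ports
-- ===== SOURCE B (Python) =====
-- def expand_instances_per_port(ports, max_instances=5):
--     """
--     For individual ports, expands up to max_instances consecutive ports for each base.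
--     Avoids overlaps.
--     """
--     result = set()
--     remaining = list(ports)
--     while remaining:
--         p = min(remaining)
--         result.update(range(p, p + max_instances))
--         remaining = [q for q in remaining if q > p and q > p + max_instances - 1]
--     return result
-- ===== Notes on version B (the rewrite author's own statement) =====
-- stated objective: alternative
-- what changed: Replaces A's sort-then-sweep (a used set plus a per-port build-and-intersect overlap test) by a selection worklist: no sorting and no used set -- repeatedly extract the minimum remaining port, emit its block, and drop every remaining port the block covers in one filter pass.
import Mathlib
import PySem

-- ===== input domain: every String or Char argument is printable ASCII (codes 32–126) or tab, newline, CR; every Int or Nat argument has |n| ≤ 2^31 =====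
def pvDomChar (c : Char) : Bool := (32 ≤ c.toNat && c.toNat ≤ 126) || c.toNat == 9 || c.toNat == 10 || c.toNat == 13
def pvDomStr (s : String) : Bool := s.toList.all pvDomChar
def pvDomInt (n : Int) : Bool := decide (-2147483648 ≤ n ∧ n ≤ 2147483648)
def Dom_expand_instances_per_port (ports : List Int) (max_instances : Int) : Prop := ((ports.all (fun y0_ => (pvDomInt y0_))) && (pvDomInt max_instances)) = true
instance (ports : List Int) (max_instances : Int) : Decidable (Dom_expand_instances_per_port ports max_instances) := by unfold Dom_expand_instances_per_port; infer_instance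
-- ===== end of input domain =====

-- B replaces A's sort-then-sweep (used set + per-port set-intersection overlap test) by a
-- selection worklist: repeatedly take min(remaining), emit its block, filter covered ports out
-- (objective: alternative decomposition, no sorting and no used set).

-- ===== PORT A =====
-- state: (expanded_ports, used); Python's truthiness test 'not (block & used)' is ported as Set.isdisjoint (exact)
def expand_instances_per_port (ports : List Int) (max_instances : Int) : List Int :=
  ((PySem.List.sorted ports (fun x => x) false).foldl
    (fun (st : PySem.Set Int × PySem.Set Int) (p : Int) =>
      let block : PySem.Set Int :=
        PySem.Set.ofList ((PySem.List.pyRange 0 max_instances 1).map (fun i => p + i))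
      if PySem.Set.isdisjoint block st.2 then
        (PySem.Set.update st.1 block, PySem.Set.update st.2 block)
      else st)
    (PySem.Set.empty, PySem.Set.empty)).1

-- ===== PORT B =====
-- the while loop: p = min(remaining); result.update(range(p, p+m)); filter remaining.
-- Python's 'while remaining' guard is exactly the 'min? = none ↔ remaining = []' case of the match.
def expandWorklist (m : Int) (result : PySem.Set Int) (remaining : List Int) : List Int :=
  match h : PySem.List.min? remaining (fun x => x) with
  | none => result
  | some p =>
      expandWorklist m (PySem.Set.update result (PySem.List.pyRange p (p + m) 1))
        (remaining.filter (fun q => decide (p < q) && decide (p + m - 1 < q)))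
termination_by remaining.length
decreasing_by
  have hp : p ∈ remaining := PySem.List.min?_mem h
  have h2 : (remaining.attach.filter
      (fun x => decide (p < x.1) && decide (p + m - 1 < x.1))).length <
      remaining.attach.length :=
    List.length_filter_lt_length_iff_exists.mpr ⟨⟨p, hp⟩, List.mem_attach _ _, by simp⟩
  rw [List.length_unattach]
  simpa [List.length_attach] using h2

def expand_instances_per_port_alt (ports : List Int) (max_instances : Int) : List Int :=
  expandWorklist max_instances PySem.Set.empty ports

-- ===== PRECONDITION & SPEC =====
def Spec_expand_instances_per_port (ports : List Int) (max_instances : Int) (out : List Int) : Prop := out = expand_instances_per_port_alt ports max_instances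
instance (ports : List Int) (max_instances : Int) (out : List Int) : Decidable (Spec_expand_instances_per_port ports max_instances out) := by unfold Spec_expand_instances_per_port; infer_instance

-- ===== CLAIM (what is proved, stated in full; the proofs are below) =====
def Claim_equal_expand_instances_per_port : Prop := ∀ (ports : List Int) (max_instances : Int), Dom_expand_instances_per_port ports max_instances → Spec_expand_instances_per_port ports max_instances (expand_instances_per_port ports max_instances)

-- ===== LEMMAS AND PROOFS =====

-- A's loop body as a named function (definitionally equal to the closure in the port)
def stepA (m : Int) (st : PySem.Set Int × PySem.Set Int) (p : Int) :
    PySem.Set Int × PySem.Set Int :=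
  if PySem.Set.isdisjoint
      (PySem.Set.ofList ((PySem.List.pyRange 0 m 1).map (fun i => p + i))) st.2 then
    (PySem.Set.update st.1
       (PySem.Set.ofList ((PySem.List.pyRange 0 m 1).map (fun i => p + i))),
     PySem.Set.update st.2
       (PySem.Set.ofList ((PySem.List.pyRange 0 m 1).map (fun i => p + i))))
  else st

lemma block_eq (p m : Int) :
    PySem.Set.ofList ((PySem.List.pyRange 0 m 1).map (fun i => p + i)) =
    PySem.List.pyRange p (p + m) 1 := by
  have h : (PySem.List.pyRange 0 m 1).map (fun i => p + i) =
      PySem.List.pyRange p (p + m) 1 := by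
    simp [PySem.List.pyRange_one, List.map_map, Function.comp]
  rw [h]
  exact PySem.Set.ofList_eq_self_of_nodup _ (PySem.List.nodup_pyRange_one p (p+m))

lemma worklist_nil (m : Int) (acc : PySem.Set Int) : expandWorklist m acc [] = acc := by
  rw [expandWorklist]
  rfl

lemma worklist_step (m : Int) (acc : PySem.Set Int) (rem : List Int) (p : Int)
    (h : PySem.List.min? rem (fun x => x) = some p) :
    expandWorklist m acc rem =
      expandWorklist m (PySem.Set.update acc (PySem.List.pyRange p (p + m) 1))
        (rem.filter (fun q => decide (p < q) && decide (p + m - 1 < q))) := by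
  rw [expandWorklist]
  split
  · rename_i h' ; rw [h] at h' ; cases h'
  · rename_i p' h' ; rw [h] at h' ; cases h' ; rfl

lemma filter_shorter (rem : List Int) (p m : Int) (hp : p ∈ rem) :
    (rem.filter (fun q => decide (p < q) && decide (p + m - 1 < q))).length < rem.length :=
  List.length_filter_lt_length_iff_exists.mpr ⟨p, hp, by simp⟩

-- the worklist's value depends only on the multiset of remaining ports
lemma worklist_perm (m : Int) :
    ∀ (n : Nat) (rem rem' : List Int) (acc : PySem.Set Int),
      rem.length ≤ n → rem.Perm rem' →
      expandWorklist m acc rem = expandWorklist m acc rem' := by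
  intro n
  induction n with
  | zero =>
    intro rem rem' acc hn hperm
    have : rem = [] := List.eq_nil_of_length_eq_zero (Nat.le_zero.mp hn)
    subst this
    rw [hperm.nil_eq]
  | succ n ih =>
    intro rem rem' acc hn hperm
    cases hmin : PySem.List.min? rem (fun x => x) with
    | none =>
      have h1 : rem = [] := (PySem.List.min?_eq_none_iff _ _).mp hmin
      subst h1
      rw [hperm.nil_eq]
    | some p =>
      have hp : p ∈ rem := PySem.List.min?_mem hmin
      have hlb : ∀ y ∈ rem, p ≤ y := by
        have := PySem.List.min?_isMin hmin
        simpa using this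
      have hne' : rem' ≠ [] := by
        intro h; subst h; exact absurd (hperm.mem_iff.mp hp) (by simp)
      cases hmin' : PySem.List.min? rem' (fun x => x) with
      | none => exact absurd ((PySem.List.min?_eq_none_iff _ _).mp hmin') hne'
      | some p' =>
        have hp' : p' ∈ rem' := PySem.List.min?_mem hmin'
        have hlb' : ∀ y ∈ rem', p' ≤ y := by
          have := PySem.List.min?_isMin hmin'
          simpa using this
        have hpp : p = p' :=
          le_antisymm (hlb p' (hperm.mem_iff.mpr hp')) (hlb' p (hperm.mem_iff.mp hp))
        subst hpp
        rw [worklist_step m acc rem p hmin, worklist_step m acc rem' p hmin']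
        have hlen : (rem.filter (fun q => decide (p < q) && decide (p + m - 1 < q))).length ≤ n := by
          have := filter_shorter rem p m hp
          omega
        exact ih _ _ _ hlen (hperm.filter _)

-- m ≤ 0: A's loop body is the identity
lemma foldA_nonpos (m : Int) (hm : m ≤ 0) (s : List Int) (st : PySem.Set Int × PySem.Set Int) :
    s.foldl (stepA m) st = st := by
  induction s generalizing st with
  | nil => rfl
  | cons p rest ih =>
    have hb : (PySem.List.pyRange 0 m 1).map (fun i => p + i) = [] := by
      rw [PySem.List.pyRange_one_eq_nil hm]; rfl
    simp [List.foldl_cons, stepA, hb, PySem.Set.ofList_nil, ih,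
      PySem.Set.isdisjoint, PySem.Set.update]

-- m ≤ 0: the worklist only adds empty blocks
lemma worklist_nonpos (m : Int) (hm : m ≤ 0) :
    ∀ (n : Nat) (rem : List Int) (acc : PySem.Set Int),
      rem.length ≤ n → expandWorklist m acc rem = acc := by
  intro n
  induction n with
  | zero =>
    intro rem acc hn
    have : rem = [] := List.eq_nil_of_length_eq_zero (Nat.le_zero.mp hn)
    subst this
    exact worklist_nil m acc
  | succ n ih =>
    intro rem acc hn
    cases hmin : PySem.List.min? rem (fun x => x) with
    | none =>
      have h1 : rem = [] := (PySem.List.min?_eq_none_iff _ _).mp hmin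
      subst h1
      exact worklist_nil m acc
    | some p =>
      have hp : p ∈ rem := PySem.List.min?_mem hmin
      rw [worklist_step m acc rem p hmin]
      have hb : PySem.List.pyRange p (p + m) 1 = [] :=
        PySem.List.pyRange_one_eq_nil (by omega)
      rw [hb]
      have hlen : (rem.filter (fun q => decide (p < q) && decide (p + m - 1 < q))).length ≤ n := by
        have := filter_shorter rem p m hp
        omega
      rw [show PySem.Set.update acc ([] : List Int) = acc from rfl]
      exact ih _ acc hlen

-- head of a sorted nonempty worklist is its minimum
lemma min?_sorted_head (p : Int) (rest : List Int) (hlb : ∀ y ∈ rest, p ≤ y) :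
    PySem.List.min? (p :: rest) (fun x => x) = some p := by
  rw [PySem.List.min?_id_cons]
  congr 1
  rcases PySem.List.foldl_min_mem rest p with h | h
  · exact h
  · exact le_antisymm ((PySem.List.foldl_min_le rest p).1) (hlb _ h)

-- the still-uncovered part of the worklist, as a function of the last block end
def pending (s : List Int) : Option Int → List Int
  | none => s
  | some e => s.filter (fun q => decide (e < q))

-- main invariant: over a sorted tail s, A's diagonal fold from (u,u) computes exactly the
-- worklist applied to s with the already-covered ports (those ≤ e) filtered away
lemma key (m : Int) (hm : 0 < m) :
    ∀ (s : List Int), s.Pairwise (· ≤ ·) → ∀ (u : List Int) (e? : Option Int),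
      ((e? = none ∧ u = []) ∨
        ∃ e p0, e? = some e ∧ e = p0 + m - 1 ∧
          (∀ x ∈ u, x ≤ e) ∧ (∀ x : Int, p0 ≤ x → x ≤ e → x ∈ u) ∧ (∀ q ∈ s, p0 ≤ q)) →
      (s.foldl (stepA m) (u, u)).1 = expandWorklist m u (pending s e?) := by
  intro s
  induction s with
  | nil =>
    rintro _ u e? (⟨rfl, rfl⟩ | ⟨e, p0, rfl, _⟩) <;>
      simp only [pending, List.filter_nil, List.foldl_nil, worklist_nil]
  | cons p rest ih =>
    intro hp u e? hrel
    obtain ⟨hple, hrest⟩ := List.pairwise_cons.mp hp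
    have hRmem : ∀ x ∈ PySem.List.pyRange p (p + m) 1, p ≤ x ∧ x < p + m := by
      intro x hx; exact (PySem.List.mem_pyRange_one).mp hx
    rcases hrel with ⟨rfl, rfl⟩ | ⟨e, p0, rfl, he, hub, hcov, hlo⟩ <;>
      simp only [pending]
    · -- first element ever: A accepts; the worklist picks p as its minimum
      have hAstep : stepA m ([], []) p =
          (PySem.Set.update [] (PySem.List.pyRange p (p+m) 1),
           PySem.Set.update [] (PySem.List.pyRange p (p+m) 1)) := by
        unfold stepA
        rw [block_eq]
        rw [if_pos ((PySem.Set.isdisjoint_iff _ _).mpr (by intro x _ hx; simp at hx))]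
      have hmin : PySem.List.min? (p :: rest) (fun x => x) = some p :=
        min?_sorted_head p rest hple
      rw [List.foldl_cons, hAstep, worklist_step m _ _ p hmin]
      have hfilt : (p :: rest).filter (fun q => decide (p < q) && decide (p + m - 1 < q)) =
          rest.filter (fun q => decide (p + m - 1 < q)) := by
        rw [List.filter_cons, if_neg (by simp)]
        apply List.filter_congr
        intro x _
        by_cases hx : p + m - 1 < x
        · simp [hx, show p < x by omega]
        · simp [hx]
      rw [hfilt]
      have hupd : PySem.Set.update ([] : PySem.Set Int) (PySem.List.pyRange p (p+m) 1) =
          PySem.List.pyRange p (p+m) 1 :=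
        (PySem.Set.update_nil_left _).trans
          (PySem.Set.ofList_eq_self_of_nodup _ (PySem.List.nodup_pyRange_one p (p+m)))
      exact ih hrest _ (some (p + m - 1))
        (Or.inr ⟨p + m - 1, p, rfl, rfl,
          (by intro x hx
              rw [hupd] at hx
              have := hRmem x hx; omega),
          (by intro x h1 h2
              rw [hupd]
              exact (PySem.List.mem_pyRange_one).mpr ⟨h1, by omega⟩),
          fun q hq => hple q hq⟩)
    · have hpq : p0 ≤ p := hlo p (List.mem_cons_self ..)
      by_cases hlt : e < p
      · -- accept: the block lies strictly above everything used
        have hdisj : ∀ x ∈ PySem.List.pyRange p (p+m) 1, x ∉ u := by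
          intro x hx hxu
          have h1 := hRmem x hx
          have h2 := hub x hxu
          omega
        have hAstep : stepA m (u, u) p =
            (PySem.Set.update u (PySem.List.pyRange p (p+m) 1),
             PySem.Set.update u (PySem.List.pyRange p (p+m) 1)) := by
          unfold stepA
          rw [block_eq]
          rw [if_pos ((PySem.Set.isdisjoint_iff _ _).mpr hdisj)]
        have hfilt1 : (p :: rest).filter (fun q => decide (e < q)) =
            p :: rest.filter (fun q => decide (e < q)) := by
          rw [List.filter_cons, if_pos (by simp [hlt])]
        have hminlb : ∀ y ∈ rest.filter (fun q => decide (e < q)), p ≤ y := by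
          intro y hy; exact hple y (List.mem_of_mem_filter hy)
        have hmin : PySem.List.min? (p :: rest.filter (fun q => decide (e < q))) (fun x => x) =
            some p := min?_sorted_head p _ hminlb
        rw [List.foldl_cons, hAstep, hfilt1, worklist_step m _ _ p hmin]
        have hfilt2 : (p :: rest.filter (fun q => decide (e < q))).filter
              (fun q => decide (p < q) && decide (p + m - 1 < q)) =
            rest.filter (fun q => decide (p + m - 1 < q)) := by
          rw [List.filter_cons, if_neg (by simp)]
          rw [List.filter_filter]
          apply List.filter_congr
          intro x _
          by_cases hx : p + m - 1 < x
          · simp [hx, show p < x by omega, show e < x by omega]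
          · simp [hx]
        rw [hfilt2]
        have hupd : PySem.Set.update u (PySem.List.pyRange p (p+m) 1) =
            u ++ PySem.List.pyRange p (p+m) 1 :=
          PySem.Set.update_eq_append_of_disjoint _ _ (PySem.List.nodup_pyRange_one p (p+m)) hdisj
        exact ih hrest _ (some (p + m - 1))
          (Or.inr ⟨p + m - 1, p, rfl, rfl,
            (by intro x hx
                rw [hupd] at hx
                rcases List.mem_append.mp hx with h | h
                · have := hub x h; omega
                · have := hRmem x h; omega),
            (by intro x h1 h2
                rw [hupd]
                exact List.mem_append_right _ ((PySem.List.mem_pyRange_one).mpr ⟨h1, by omega⟩)),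
            fun q hq => hple q hq⟩)
      · -- reject: p is already covered (p0 ≤ p ≤ e), p itself witnesses the overlap
        have hpu : p ∈ u := hcov p hpq (by omega)
        have hpR : p ∈ PySem.List.pyRange p (p+m) 1 :=
          (PySem.List.mem_pyRange_one).mpr (by omega)
        have hAstep : stepA m (u, u) p = (u, u) := by
          unfold stepA
          rw [block_eq]
          rw [if_neg (by
            intro h
            exact ((PySem.Set.isdisjoint_iff _ _).mp h) p hpR hpu)]
        have hfilt : (p :: rest).filter (fun q => decide (e < q)) =
            rest.filter (fun q => decide (e < q)) := by
          rw [List.filter_cons, if_neg (by simp; omega)]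
        rw [List.foldl_cons, hAstep, hfilt]
        exact ih hrest _ (some e)
          (Or.inr ⟨e, p0, rfl, he, hub, hcov, fun q hq => hlo q (List.mem_cons_of_mem _ hq)⟩)

-- ===== VERDICT (by name: the statement is the Claim_ definition above) =====
theorem expand_instances_per_port_spec : Claim_equal_expand_instances_per_port := by
  intro ports m _
  unfold Spec_expand_instances_per_port
  show expand_instances_per_port ports m = expand_instances_per_port_alt ports m
  have hA : expand_instances_per_port ports m =
      ((PySem.List.sorted ports (fun x => x) false).foldl (stepA m)
        (PySem.Set.empty, PySem.Set.empty)).1 := rfl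
  have hB : expand_instances_per_port_alt ports m =
      expandWorklist m PySem.Set.empty ports := rfl
  rw [hA, hB]
  by_cases hm : 0 < m
  · have hp : (PySem.List.sorted ports (fun x => x) false).Pairwise (· ≤ ·) :=
      PySem.List.sorted_pairwise ports (fun x => x)
    have hkey := key m hm (PySem.List.sorted ports (fun x => x) false) hp
      PySem.Set.empty none (Or.inl ⟨rfl, rfl⟩)
    rw [hkey]
    simp only [pending]
    exact worklist_perm m (PySem.List.sorted ports (fun x => x) false).length _ _ _
      le_rfl (PySem.List.sorted_perm ports (fun x => x) false)
  · rw [foldA_nonpos m (by omega)]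
    exact (worklist_nonpos m (by omega) ports.length ports _ le_rfl).symm
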